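-- pv_equiv track=rewrite | github.com/mroraie/textdiff | comparator/algorithms/visualization.py | _calculate_sentence_stats
-- ===== SOURCE A (Python) =====
-- from typing import Dict, List, Optional, Tuple
--
-- def _calculate_sentence_stats(words1: list[str], words2: list[str], operations: Optional[List[Dict]]) -> Dict[str, int]:
--     if operations:
--         stats = {"matches": 0, "substitutes": 0, "deletes": 0, "inserts": 0}
--         for op in operations:
--             op_type = op.get("type", "")
--             if op_type == "match":
--                 stats["matches"] += 1
--             elif op_type == "substitute":
--                 stats["substitutes"] += 1
--             elif op_type == "delete":
--                 stats["deletes"] += 1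
--             elif op_type == "insert":
--                 stats["inserts"] += 1
--         return stats
--     else:
--         min_len = min(len(words1), len(words2))
--         return {
--             "matches": min_len,
--             "substitutes": 0,
--             "deletes": max(0, len(words1) - min_len),
--             "inserts": max(0, len(words2) - min_len),
--         }
-- ===== SOURCE B (Python) =====
-- from typing import Dict, List, Optional
--
--
-- def _tally(ops):
--     # divide and conquer: split the list in half, tally each half recursively,
--     # combine by component-wise addition of the (match, substitute, delete, insert) vectors
--     if len(ops) == 0:
--         return (0, 0, 0, 0)
--     if len(ops) == 1:
--         t = ops[0].get("type", "")
--         return (int(t == "match"), int(t == "substitute"),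
--                 int(t == "delete"), int(t == "insert"))
--     mid = len(ops) // 2
--     a = _tally(ops[:mid])
--     b = _tally(ops[mid:])
--     return (a[0] + b[0], a[1] + b[1], a[2] + b[2], a[3] + b[3])
--
--
-- def _calculate_sentence_stats(words1: list[str], words2: list[str], operations: Optional[List[Dict]]) -> Dict[str, int]:
--     if operations:
--         m, s, d, i = _tally(operations)
--         return {"matches": m, "substitutes": s, "deletes": d, "inserts": i}
--     min_len = min(len(words1), len(words2))
--     return {
--         "matches": min_len,
--         "substitutes": 0,
--         "deletes": max(0, len(words1) - min_len),
--         "inserts": max(0, len(words2) - min_len),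
--     }
-- ===== Notes on version B (the rewrite author's own statement) =====
-- stated objective: alternative
-- what changed: Replaces A's sequential loop mutating a four-counter dict with a divide-and-conquer tally: the operation list is split in half recursively, each half reduced to a one-hot (match,substitute,delete,insert) 4-tuple at the leaves, and halves combined by component-wise addition; correct because the four counts are additive over list concatenation. The length-based else branch is unchanged.
import Mathlib
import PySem

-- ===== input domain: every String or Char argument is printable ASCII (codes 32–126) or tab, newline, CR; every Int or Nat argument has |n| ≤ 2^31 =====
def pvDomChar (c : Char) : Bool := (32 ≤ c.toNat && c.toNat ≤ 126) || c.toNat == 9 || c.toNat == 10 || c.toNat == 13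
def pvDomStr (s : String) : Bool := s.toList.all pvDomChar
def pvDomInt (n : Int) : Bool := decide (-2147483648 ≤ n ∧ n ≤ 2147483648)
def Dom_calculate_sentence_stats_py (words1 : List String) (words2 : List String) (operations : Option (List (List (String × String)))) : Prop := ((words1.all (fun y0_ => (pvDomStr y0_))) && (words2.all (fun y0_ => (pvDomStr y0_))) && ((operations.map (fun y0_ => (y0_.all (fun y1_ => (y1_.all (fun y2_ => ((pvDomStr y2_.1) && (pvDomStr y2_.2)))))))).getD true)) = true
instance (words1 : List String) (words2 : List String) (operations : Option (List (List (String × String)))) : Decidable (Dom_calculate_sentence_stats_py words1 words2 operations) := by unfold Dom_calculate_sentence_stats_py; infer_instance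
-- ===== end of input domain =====

-- B replaces A's sequential four-counter loop with a divide-and-conquer tally (split in half,
-- one-hot 4-tuples at the leaves, component-wise addition to combine); else branch unchanged.

-- ===== PORT A =====
def calculate_sentence_stats_py (words1 : List String) (words2 : List String) (operations : Option (List (List (String × String)))) : List (String × Int) :=
  match operations with
  | some (op0 :: rest) =>
    let stats : PySem.Dict String Int :=
      PySem.Dict.mk [("matches", 0), ("substitutes", 0), ("deletes", 0), ("inserts", 0)]
    let stats := (op0 :: rest).foldl (fun d op =>
      let op_type := (PySem.Dict.mk op).getD "type" ""
      if op_type = "match" then d.modify "matches" 0 (· + 1)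
      else if op_type = "substitute" then d.modify "substitutes" 0 (· + 1)
      else if op_type = "delete" then d.modify "deletes" 0 (· + 1)
      else if op_type = "insert" then d.modify "inserts" 0 (· + 1)
      else d) stats
    stats.items
  | _ =>
    let min_len : Int := min (words1.length : Int) (words2.length : Int)
    [("matches", min_len), ("substitutes", 0),
     ("deletes", max 0 ((words1.length : Int) - min_len)),
     ("inserts", max 0 ((words2.length : Int) - min_len))]

-- ===== PORT B =====
-- _tally: divide-and-conquer; ops[:mid] / ops[mid:] with 0 ≤ mid ≤ len are exactly take/drop.
def statsGo : List (List (String × String)) → Int × Int × Int × Int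
  | [] => (0, 0, 0, 0)
  | [op] =>
    let t := (PySem.Dict.mk op).getD "type" ""
    ((if t = "match" then 1 else 0), (if t = "substitute" then 1 else 0),
     (if t = "delete" then 1 else 0), (if t = "insert" then 1 else 0))
  | op0 :: op1 :: rest =>
    let mid := (op0 :: op1 :: rest).length / 2  -- len(ops) // 2, nonneg so Nat division is exact
    let a := statsGo ((op0 :: op1 :: rest).take mid)
    let b := statsGo ((op0 :: op1 :: rest).drop mid)
    (a.1 + b.1, a.2.1 + b.2.1, a.2.2.1 + b.2.2.1, a.2.2.2 + b.2.2.2)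
termination_by ops => ops.length
decreasing_by
  · simp; omega
  · simp; omega

def calculate_sentence_stats_py_alt (words1 : List String) (words2 : List String) (operations : Option (List (List (String × String)))) : List (String × Int) :=
  match operations with
  | none =>
    let min_len : Int := min (words1.length : Int) (words2.length : Int)
    [("matches", min_len), ("substitutes", 0),
     ("deletes", max 0 ((words1.length : Int) - min_len)),
     ("inserts", max 0 ((words2.length : Int) - min_len))]
  | some [] =>
    let min_len : Int := min (words1.length : Int) (words2.length : Int)
    [("matches", min_len), ("substitutes", 0),
     ("deletes", max 0 ((words1.length : Int) - min_len)),
     ("inserts", max 0 ((words2.length : Int) - min_len))]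
  | some (op0 :: rest) =>
    let r := statsGo (op0 :: rest)
    [("matches", r.1), ("substitutes", r.2.1), ("deletes", r.2.2.1), ("inserts", r.2.2.2)]

-- ===== PRECONDITION & SPEC =====
def Spec_calculate_sentence_stats_py (words1 : List String) (words2 : List String) (operations : Option (List (List (String × String)))) (out : List (String × Int)) : Prop := out = calculate_sentence_stats_py_alt words1 words2 operations
instance (words1 : List String) (words2 : List String) (operations : Option (List (List (String × String)))) (out : List (String × Int)) : Decidable (Spec_calculate_sentence_stats_py words1 words2 operations out) := by unfold Spec_calculate_sentence_stats_py; infer_instance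

-- ===== CLAIM =====
def Claim_equal_calculate_sentence_stats_py : Prop := ∀ (words1 : List String) (words2 : List String) (operations : Option (List (List (String × String)))), Dom_calculate_sentence_stats_py words1 words2 operations → Spec_calculate_sentence_stats_py words1 words2 operations (calculate_sentence_stats_py words1 words2 operations)

-- ===== LEMMAS AND PROOFS =====

-- A's loop state accumulates exactly the counts of each type.
lemma aLoop_items (ops : List (List (String × String))) (m s d i : Int) :
    ((ops.foldl (fun d op =>
      let op_type := (PySem.Dict.mk op).getD "type" ""
      if op_type = "match" then d.modify "matches" 0 (· + 1)
      else if op_type = "substitute" then d.modify "substitutes" 0 (· + 1)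
      else if op_type = "delete" then d.modify "deletes" 0 (· + 1)
      else if op_type = "insert" then d.modify "inserts" 0 (· + 1)
      else d)
      (PySem.Dict.mk [("matches", m), ("substitutes", s), ("deletes", d), ("inserts", i)])).items)
    = [("matches", m + ((ops.map (fun op => (PySem.Dict.mk op).getD "type" "")).count "match" : Int)),
       ("substitutes", s + ((ops.map (fun op => (PySem.Dict.mk op).getD "type" "")).count "substitute" : Int)),
       ("deletes", d + ((ops.map (fun op => (PySem.Dict.mk op).getD "type" "")).count "delete" : Int)),
       ("inserts", i + ((ops.map (fun op => (PySem.Dict.mk op).getD "type" "")).count "insert" : Int))] := by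
  induction ops generalizing m s d i with
  | nil => simp
  | cons op rest ih =>
    simp only [List.foldl_cons]
    by_cases h1 : (PySem.Dict.mk op).getD "type" "" = "match"
    · have hd : (PySem.Dict.mk [("matches", m), ("substitutes", s), ("deletes", d), ("inserts", i)]).modify "matches" 0 (· + 1)
          = PySem.Dict.mk [("matches", m + 1), ("substitutes", s), ("deletes", d), ("inserts", i)] := by
        simp [PySem.Dict.modify, PySem.Dict.insert, PySem.Dict.getD, PySem.Dict.get?, PySem.Dict.contains]
      simp [h1, hd, ih]
      omega
    · by_cases h2 : (PySem.Dict.mk op).getD "type" "" = "substitute"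
      · have hd : (PySem.Dict.mk [("matches", m), ("substitutes", s), ("deletes", d), ("inserts", i)]).modify "substitutes" 0 (· + 1)
            = PySem.Dict.mk [("matches", m), ("substitutes", s + 1), ("deletes", d), ("inserts", i)] := by
          simp [PySem.Dict.modify, PySem.Dict.insert, PySem.Dict.getD, PySem.Dict.get?, PySem.Dict.contains]
        simp [h2, hd, ih]
        omega
      · by_cases h3 : (PySem.Dict.mk op).getD "type" "" = "delete"
        · have hd : (PySem.Dict.mk [("matches", m), ("substitutes", s), ("deletes", d), ("inserts", i)]).modify "deletes" 0 (· + 1)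
              = PySem.Dict.mk [("matches", m), ("substitutes", s), ("deletes", d + 1), ("inserts", i)] := by
            simp [PySem.Dict.modify, PySem.Dict.insert, PySem.Dict.getD, PySem.Dict.get?, PySem.Dict.contains]
          simp [h3, hd, ih]
          omega
        · by_cases h4 : (PySem.Dict.mk op).getD "type" "" = "insert"
          · have hd : (PySem.Dict.mk [("matches", m), ("substitutes", s), ("deletes", d), ("inserts", i)]).modify "inserts" 0 (· + 1)
                = PySem.Dict.mk [("matches", m), ("substitutes", s), ("deletes", d), ("inserts", i + 1)] := by
              simp [PySem.Dict.modify, PySem.Dict.insert, PySem.Dict.getD, PySem.Dict.get?, PySem.Dict.contains]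
            simp [h4, hd, ih]
            omega
          · simp only [h1, h2, h3, h4, ite_false, ih, List.map_cons, List.count_cons]
            simp [h1, h2, h3, h4]

-- The divide-and-conquer tally computes the four counts (additivity of count over the split).
lemma statsGo_eq_aux (n : Nat) : ∀ (ops : List (List (String × String))), ops.length ≤ n →
    statsGo ops
      = (((ops.map (fun op => (PySem.Dict.mk op).getD "type" "")).count "match" : Int),
         ((ops.map (fun op => (PySem.Dict.mk op).getD "type" "")).count "substitute" : Int),
         ((ops.map (fun op => (PySem.Dict.mk op).getD "type" "")).count "delete" : Int),
         ((ops.map (fun op => (PySem.Dict.mk op).getD "type" "")).count "insert" : Int)) := by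
  induction n with
  | zero =>
    intro ops h
    have : ops = [] := List.eq_nil_of_length_eq_zero (Nat.le_zero.mp h)
    subst this; simp [statsGo]
  | succ n ih =>
    intro ops h
    match ops with
    | [] => simp [statsGo]
    | [op] =>
      clear ih h
      rw [statsGo]
      simp only [List.map_cons, List.map_nil, List.count_cons, List.count_nil]
      split_ifs <;> simp_all [beq_iff_eq]
    | op0 :: op1 :: rest =>
      have hlen : (op0 :: op1 :: rest).length = rest.length + 2 := by simp
      have hmid1 : ((op0 :: op1 :: rest).take ((op0 :: op1 :: rest).length / 2)).length ≤ n := by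
        simp [List.length_take]; omega
      have hmid2 : ((op0 :: op1 :: rest).drop ((op0 :: op1 :: rest).length / 2)).length ≤ n := by
        simp [List.length_drop] at *; omega
      have ha := ih _ hmid1
      have hb := ih _ hmid2
      have hsplit : ∀ k : String,
          ((op0 :: op1 :: rest).map (fun op => (PySem.Dict.mk op).getD "type" "")).count k
          = (((op0 :: op1 :: rest).take ((op0 :: op1 :: rest).length / 2)).map
               (fun op => (PySem.Dict.mk op).getD "type" "")).count k
            + (((op0 :: op1 :: rest).drop ((op0 :: op1 :: rest).length / 2)).map
               (fun op => (PySem.Dict.mk op).getD "type" "")).count k := by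
        intro k
        conv_lhs => rw [← List.take_append_drop ((op0 :: op1 :: rest).length / 2) (op0 :: op1 :: rest)]
        rw [List.map_append, List.count_append]
      rw [statsGo, ha, hb]
      simp only [hsplit]
      push_cast
      rfl

lemma statsGo_eq (ops : List (List (String × String))) :
    statsGo ops
      = (((ops.map (fun op => (PySem.Dict.mk op).getD "type" "")).count "match" : Int),
         ((ops.map (fun op => (PySem.Dict.mk op).getD "type" "")).count "substitute" : Int),
         ((ops.map (fun op => (PySem.Dict.mk op).getD "type" "")).count "delete" : Int),
         ((ops.map (fun op => (PySem.Dict.mk op).getD "type" "")).count "insert" : Int)) :=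
  statsGo_eq_aux ops.length ops le_rfl

-- ===== VERDICT =====
theorem calculate_sentence_stats_py_spec : Claim_equal_calculate_sentence_stats_py := by
  intro words1 words2 operations _
  unfold Spec_calculate_sentence_stats_py calculate_sentence_stats_py calculate_sentence_stats_py_alt
  match operations with
  | none => rfl
  | some [] => rfl
  | some (op0 :: rest) =>
    simp only [aLoop_items, statsGo_eq, zero_add]
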